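-- pv_equiv track=rewrite | github.com/AshishBabu09/DAA_UPLOADS_AIE22065 | Q3_lab5.py | pylons
-- ===== SOURCE A (Python) =====
-- def pylons(distribution, positions):
--     total_plants = 0
--     last_plant_pos = -1
--     i = 0
--
--     while i < len(positions):
--         plant_location = min(i + distribution - 1, len(positions) - 1)
--
--         while plant_location > last_plant_pos:
--             if positions[plant_location] == 1:
--                 break
--             plant_location -= 1
--
--         if plant_location == last_plant_pos:
--             return -1
--
--         total_plants += 1
--         last_plant_pos = plant_location + distribution - 1
--         i = last_plant_pos + 1
--
--     return total_plants
-- ===== SOURCE B (Python) =====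
-- def pylons(distribution, positions):
--     n = len(positions)
--     # one forward pass: prev_one[j] = largest index k <= j with positions[k] == 1, else -1
--     prev_one = []
--     last = -1
--     for j, v in enumerate(positions):
--         if v == 1:
--             last = j
--         prev_one.append(last)
--     count = 0
--     i = 0
--     while i < n:
--         reach = min(i + distribution - 1, n - 1)
--         if reach < i:
--             return -1
--         p = prev_one[reach]
--         if p < i:
--             return -1
--         count += 1
--         i = p + distribution
--     return count
-- ===== Notes on version B (the rewrite author's own statement) =====
-- stated objective: alternative
-- what changed: Replaces A's inner backward scan for the rightmost reachable 1 by a prev_one table precomputed in one forward pass, so the greedy loop does a single table lookup per placement instead of scanning; worst-case work drops but on random inputs the cost is comparable.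
import Mathlib
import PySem

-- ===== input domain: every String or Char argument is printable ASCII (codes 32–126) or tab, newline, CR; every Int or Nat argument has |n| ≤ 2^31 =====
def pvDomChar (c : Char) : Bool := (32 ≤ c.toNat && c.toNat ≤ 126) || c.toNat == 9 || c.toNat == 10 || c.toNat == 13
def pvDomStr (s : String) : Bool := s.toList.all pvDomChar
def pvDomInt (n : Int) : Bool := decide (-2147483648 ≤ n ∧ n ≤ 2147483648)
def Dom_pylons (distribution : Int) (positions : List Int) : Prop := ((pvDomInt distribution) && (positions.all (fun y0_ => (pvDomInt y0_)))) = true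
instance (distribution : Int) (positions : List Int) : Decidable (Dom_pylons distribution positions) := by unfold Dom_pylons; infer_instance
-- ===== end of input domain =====

-- B replaces A's inner backward scan by a prev_one table built in one forward pass,
-- so the greedy loop does one table lookup per placement (objective: alternative; no mutation).

-- ===== PORT A =====
-- inner `while plant_location > last_plant_pos` scan; pyGet?+getD is exact here because
-- within Pre_ the scan only reads indices in [0, len) (plant > last ≥ -1 and plant ≤ len-1).
def pylonsScan (positions : List Int) (last : Int) (plant : Int) : Int :=
  if h : plant > last then
    if (PySem.List.pyGet? positions plant).getD 0 = 1 then plant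
    else pylonsScan positions last (plant - 1)
  else plant
termination_by (plant - last).toNat
decreasing_by omega

-- outer `while i < len(positions)`; fuel len+1 suffices: within Pre_ each iteration moves i
-- forward by at least 1, so at most len+1 iterations happen (the 0 at fuel 0 is unreachable).
def pylonsLoop (distribution : Int) (positions : List Int) (fuel : Nat)
    (total last i : Int) : Int :=
  match fuel with
  | 0 => 0
  | fuel + 1 =>
    if i < (positions.length : Int) then
      let plant := min (i + distribution - 1) ((positions.length : Int) - 1)
      let plant := pylonsScan positions last plant
      if plant = last then -1
      else pylonsLoop distribution positions fuel (total + 1)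
             (plant + distribution - 1) (plant + distribution)
    else total

def pylons (distribution : Int) (positions : List Int) : Int :=
  pylonsLoop distribution positions (positions.length + 1) 0 (-1) 0

-- ===== PORT B =====
-- the `for j, v in enumerate(positions)` pass building prev_one, carrying `last`
def prevOneTable (positions : List Int) (j : Int) (last : Int) : List Int :=
  match positions with
  | [] => []
  | v :: rest =>
    let last' := if v = 1 then j else last
    last' :: prevOneTable rest (j + 1) last'

-- the `while i < n` greedy loop of B; same fuel argument as for A's loop.
def pylonsAltLoop (distribution : Int) (n : Int) (prev : List Int) (fuel : Nat)
    (count i : Int) : Int :=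
  match fuel with
  | 0 => 0
  | fuel + 1 =>
    if i < n then
      let reach := min (i + distribution - 1) (n - 1)
      if reach < i then -1
      else
        let p := (PySem.List.pyGet? prev reach).getD (-1)
        if p < i then -1
        else pylonsAltLoop distribution n prev fuel (count + 1) (p + distribution)
    else count

def pylons_alt (distribution : Int) (positions : List Int) : Int :=
  pylonsAltLoop distribution (positions.length : Int) (prevOneTable positions 0 (-1))
    (positions.length + 1) 0 0

-- ===== PRECONDITION & SPEC =====
-- Pre_ excludes distribution < 0 with nonempty positions: there Python A never returns
-- (its loop index moves backwards forever); on every other input A returns a value.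
def Pre_pylons (distribution : Int) (positions : List Int) : Prop :=
  positions = [] ∨ 0 ≤ distribution
instance (distribution : Int) (positions : List Int) : Decidable (Pre_pylons distribution positions) := by
  unfold Pre_pylons; infer_instance

def pvWitness_pylons : Int × List Int := (2, [1, 0, 1])

def Spec_pylons (distribution : Int) (positions : List Int) (out : Int) : Prop := out = pylons_alt distribution positions
instance (distribution : Int) (positions : List Int) (out : Int) : Decidable (Spec_pylons distribution positions out) := by unfold Spec_pylons; infer_instance

-- ===== CLAIM (what is proved, stated in full; the proofs are below) =====
def Claim_equal_pylons : Prop := ∀ (distribution : Int) (positions : List Int), Dom_pylons distribution positions → Pre_pylons distribution positions → Spec_pylons distribution positions (pylons distribution positions)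

-- ===== LEMMAS AND PROOFS =====

-- spec of the table entries: poAux rest j0 L k = value stored at offset k of prevOneTable rest j0 L
def poAux (rest : List Int) (j0 L : Int) : Nat → Int
  | 0 => if rest.getD 0 0 = 1 then j0 else L
  | k + 1 => if rest.getD (k + 1) 0 = 1 then j0 + (k : Int) + 1 else poAux rest j0 L k

theorem poAux_cons (v : Int) (rest : List Int) (j0 L : Int) (k : Nat) :
    poAux (v :: rest) j0 L (k + 1) = poAux rest (j0 + 1) (if v = 1 then j0 else L) k := by
  induction k with
  | zero => simp [poAux]
  | succ k ih =>
    show (if rest.getD (k + 1) 0 = 1 then j0 + ((k:Int) + 1) + 1 else poAux (v :: rest) j0 L (k + 1)) = _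
    rw [ih]
    simp only [poAux]
    split <;> ring_nf

theorem prevOneTable_getElem? (positions : List Int) :
    ∀ (j0 L : Int) (k : Nat), k < positions.length →
    (prevOneTable positions j0 L)[k]? = some (poAux positions j0 L k) := by
  induction positions with
  | nil => intro _ _ k hk; simp at hk
  | cons v rest ih =>
    intro j0 L k hk
    match k with
    | 0 => simp [prevOneTable, poAux]
    | k + 1 =>
      rw [poAux_cons]
      simp only [prevOneTable]
      simpa using ih (j0 + 1) (if v = 1 then j0 else L) k (by simpa using hk)

theorem pylonsScan_unfold (positions : List Int) (last plant : Int) :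
    pylonsScan positions last plant =
      if plant > last then
        (if (PySem.List.pyGet? positions plant).getD 0 = 1 then plant
         else pylonsScan positions last (plant - 1))
      else plant := by
  rw [pylonsScan]
  split <;> rfl

theorem pylonsScan_le (positions : List Int) (last : Int) :
    ∀ plant, last ≤ plant → last ≤ pylonsScan positions last plant ∧
      pylonsScan positions last plant ≤ plant := by
  intro plant
  induction plant using pylonsScan.induct (positions := positions) (last := last) with
  | case1 plant h h1 => intro _; rw [pylonsScan]; simp [h, h1]; omega
  | case2 plant h h1 ih =>
    intro _
    rw [pylonsScan]; simp [h, h1]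
    have := ih (by omega)
    omega
  | case3 plant h => intro hle; rw [pylonsScan]; simp [h]; omega

theorem pylonsScan_merge (positions : List Int) (last : Int) (hl : -1 ≤ last) :
    ∀ plant, last ≤ plant →
      pylonsScan positions last plant = max (pylonsScan positions (-1) plant) last := by
  intro plant
  induction plant using pylonsScan.induct (positions := positions) (last := last) with
  | case1 plant h h1 =>
    intro _
    rw [pylonsScan]; simp [h, h1]
    rw [pylonsScan]; simp [show plant > -1 by omega, h1]
    omega
  | case2 plant h h1 ih =>
    intro _
    rw [pylonsScan]; simp [h, h1]
    rw [show pylonsScan positions (-1) plant = pylonsScan positions (-1) (plant - 1) by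
      rw [pylonsScan]; simp [show plant > -1 by omega, h1]]
    exact ih (by omega)
  | case3 plant h =>
    intro hle
    have hpl : plant = last := by omega
    subst hpl
    rw [pylonsScan_unfold, if_neg h]
    have := pylonsScan_le positions (-1) plant (by omega)
    omega

theorem pylonsScan_eq_poAux (positions : List Int) :
    ∀ j : Nat, pylonsScan positions (-1) (j : Int) = poAux positions 0 (-1) j := by
  intro j
  induction j with
  | zero =>
    simp only [Nat.cast_zero]
    rw [pylonsScan_unfold, if_pos (show (0:Int) > -1 by omega)]
    rw [show (PySem.List.pyGet? positions (0:Int)).getD 0 = positions.getD 0 0 by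
      rw [PySem.List.pyGet?_zero]; cases positions <;> simp]
    simp only [poAux]
    split
    · rfl
    · rw [pylonsScan_unfold]; norm_num
  | succ j ih =>
    rw [pylonsScan_unfold, if_pos (show ((j + 1 : Nat) : Int) > -1 by omega)]
    rw [show (PySem.List.pyGet? positions ((j + 1 : Nat) : Int)).getD 0 = positions.getD (j + 1) 0 by
      rw [PySem.List.pyGet?_natCast]; simp [List.getD_eq_getElem?_getD]]
    simp only [poAux]
    split
    · push_cast; ring
    · rw [show ((j + 1 : Nat) : Int) - 1 = (j : Int) by push_cast; ring]
      exact ih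

-- the value B reads from the table equals the value A's backward scan from -1 finds
theorem table_read (positions : List Int) (plant : Int) (h0 : 0 ≤ plant)
    (hlt : plant < (positions.length : Int)) :
    (PySem.List.pyGet? (prevOneTable positions 0 (-1)) plant).getD (-1)
      = pylonsScan positions (-1) plant := by
  obtain ⟨k, rfl⟩ : ∃ k : Nat, plant = (k : Int) := ⟨plant.toNat, by omega⟩
  have hk : k < positions.length := by exact_mod_cast hlt
  rw [PySem.List.pyGet?_natCast, prevOneTable_getElem? positions 0 (-1) k hk,
    pylonsScan_eq_poAux positions k]
  rfl

theorem loop_eq (distribution : Int) (positions : List Int) (hd : 1 ≤ distribution) :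
    ∀ (fuel : Nat) (total i : Int), 0 ≤ i →
      pylonsLoop distribution positions fuel total (i - 1) i
        = pylonsAltLoop distribution (positions.length : Int)
            (prevOneTable positions 0 (-1)) fuel total i := by
  intro fuel
  induction fuel with
  | zero => intro total i _; rfl
  | succ fuel ih =>
    intro total i hi
    by_cases hin : i < (positions.length : Int)
    · simp only [pylonsLoop, pylonsAltLoop, if_pos hin]
      have hb : i ≤ min (i + distribution - 1) ((positions.length : Int) - 1) ∧
          min (i + distribution - 1) ((positions.length : Int) - 1) ≤ (positions.length : Int) - 1 := by
        omega
      rw [if_neg (show ¬ (min (i + distribution - 1) ((positions.length : Int) - 1) < i) by omega)]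
      rw [table_read positions (min (i + distribution - 1) ((positions.length : Int) - 1))
            (by omega) (by omega)]
      rw [pylonsScan_merge positions (i - 1) (by omega)
            (min (i + distribution - 1) ((positions.length : Int) - 1)) (by omega)]
      set q : Int := pylonsScan positions (-1)
          (min (i + distribution - 1) ((positions.length : Int) - 1)) with hq
      by_cases hlow : q < i
      · rw [if_pos (show max q (i - 1) = i - 1 by omega), if_pos hlow]
      · rw [if_neg (show ¬ max q (i - 1) = i - 1 by omega), if_neg hlow]
        rw [show max q (i - 1) = q by omega]
        rw [show q + distribution - 1 = (q + distribution) - 1 by ring]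
        exact ih (total + 1) (q + distribution) (by omega)
    · simp only [pylonsLoop, pylonsAltLoop, if_neg hin]

-- ===== VERDICT (by name: the statement is the Claim_ definition above) =====
theorem pylons_spec : Claim_equal_pylons := by
  intro distribution positions _ hpre
  unfold Spec_pylons pylons pylons_alt
  rcases hpre with hnil | hd
  · subst hnil; rfl
  · rcases eq_or_lt_of_le hd with hz | hpos
    · -- distribution = 0
      rcases positions with _ | ⟨v, rest⟩
      · rfl
      · rw [← hz]
        simp only [pylonsLoop, pylonsAltLoop, List.length_cons]
        rw [show min ((0:Int) + 0 - 1) (((rest.length + 1 : Nat) : Int) - 1) = -1 by omega]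
        rw [pylonsScan_unfold]
        split_ifs <;> omega
    · have h := loop_eq distribution positions (by omega) (positions.length + 1) 0 0 (by omega)
      norm_num at h
      exact h
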